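-- pv_equiv track=rewrite | github.com/quantumlib/ReCirq | recirq/seniority_zero/circuits_expt/core.py | _make_lightcone
-- ===== SOURCE A (Python) =====
-- def _make_lightcone(num_qubits, depth=None):
--     """Make list of gates which are hit by a given qubit's backwards light cone.
--     Assumes a brickwall ansatz
--     """
--     if depth is None:
--         depth = num_qubits // 2
--     gates_per_layer = num_qubits // 2
--     last_layer_offset = (gates_per_layer + 1) % 2
--     timelike_gates_all_qubits = []
--     for qid in range(num_qubits):
--         # Add gate that this qubit interacts with in the last layer
--         timelike_gates_this_qubit = [[((qid - last_layer_offset) % num_qubits) // 2]]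
--         # Populate backwards
--         for layer_id in range(1, num_qubits // 2):
--             # All gate ids from the previous layer are included here
--             timelike_gates_this_qubit.append(list(timelike_gates_this_qubit[-1]))
--
--             # Either add the largest gid +1 or the smallest gid -1
--             offset = (layer_id + last_layer_offset) % 2
--             if offset == 0:
--                 timelike_gates_this_qubit[-1].append(
--                     (timelike_gates_this_qubit[-1][-1] + 1) % gates_per_layer
--                 )
--             else:
--                 timelike_gates_this_qubit[-1].insert(
--                     0, (timelike_gates_this_qubit[-1][0] - 1) % gates_per_layer
--                 )
--         timelike_gates_all_qubits.append(timelike_gates_this_qubit)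
--     return timelike_gates_all_qubits
-- ===== SOURCE B (Python) =====
-- def _make_lightcone(num_qubits, depth=None):
--     """Make list of gates which are hit by a given qubit's backwards light cone.
--     Assumes a brickwall ansatz
--     """
--     if depth is None:
--         depth = num_qubits // 2
--     gates_per_layer = num_qubits // 2
--     last_layer_offset = (gates_per_layer + 1) % 2
--     out = []
--     for qid in range(num_qubits):
--         # pivot gate: the gate this qubit touches in the last layer
--         g0 = ((qid - last_layer_offset) % num_qubits) // 2
--         layers = [[g0]]
--         # layer k is a window of k+1 consecutive gate ids around the pivot;
--         # the split of extensions between the two sides follows the parity pattern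
--         for k in range(1, gates_per_layer):
--             right = (k + last_layer_offset) // 2
--             left = k - right
--             layers.append(
--                 [v % gates_per_layer for v in range(g0 - left, g0)]
--                 + [g0]
--                 + [v % gates_per_layer for v in range(g0 + 1, g0 + right + 1)]
--             )
--         out.append(layers)
--     return out
-- ===== Notes on version B (the rewrite author's own statement) =====
-- stated objective: alternative
-- what changed: Instead of copying the previous layer and extending it at the front or back, B keeps no previous layer at all: for each layer it computes the left/right window extents in closed form from the layer index and materialises the layer directly from a range around the pivot gate.
import Mathlib
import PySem

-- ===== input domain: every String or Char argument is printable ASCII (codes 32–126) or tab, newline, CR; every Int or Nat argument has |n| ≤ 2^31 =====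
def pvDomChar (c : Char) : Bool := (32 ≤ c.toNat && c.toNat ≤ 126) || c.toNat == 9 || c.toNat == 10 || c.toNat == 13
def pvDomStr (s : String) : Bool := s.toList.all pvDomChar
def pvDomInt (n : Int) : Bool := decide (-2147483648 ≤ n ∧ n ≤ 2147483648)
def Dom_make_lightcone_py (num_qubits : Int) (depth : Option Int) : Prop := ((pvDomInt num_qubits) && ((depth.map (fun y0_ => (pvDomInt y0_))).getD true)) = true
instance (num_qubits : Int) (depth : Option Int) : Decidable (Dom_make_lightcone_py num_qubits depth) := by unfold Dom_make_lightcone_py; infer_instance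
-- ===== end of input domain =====

-- B replaces A's copy-last-layer-and-extend loop by a closed-form window: per layer it
-- computes the left/right extents arithmetically and materialises the layer from a range
-- around the pivot gate (objective: alternative decomposition, no copying of previous layers).
-- Note: `depth` is accepted but (as in A) never used after its default is filled in.

-- ===== PORT A =====
def make_lightcone_py (num_qubits : Int) (depth : Option Int) : List (List (List Int)) :=
  let _depth : Int := depth.getD (PySem.Int.floordiv num_qubits 2)
  let gates_per_layer := PySem.Int.floordiv num_qubits 2
  let last_layer_offset := PySem.Int.mod (gates_per_layer + 1) 2
  (PySem.List.pyRange 0 num_qubits 1).foldl (fun all qid =>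
    let tl0 : List (List Int) :=
      [[PySem.Int.floordiv (PySem.Int.mod (qid - last_layer_offset) num_qubits) 2]]
    let tl := (PySem.List.pyRange 1 (PySem.Int.floordiv num_qubits 2) 1).foldl
      (fun tl layer_id =>
        -- Python appends a copy of the last layer then mutates that copy in place;
        -- here the mutated copy `newlast` is appended directly (same resulting list).
        let lastLayer := (PySem.List.pyGet? tl (-1)).getD []
        let offset := PySem.Int.mod (layer_id + last_layer_offset) 2
        let newlast :=
          if offset = 0 then
            lastLayer ++
              [PySem.Int.mod ((PySem.List.pyGet? lastLayer (-1)).getD 0 + 1) gates_per_layer]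
          else
            (PySem.Int.mod ((PySem.List.pyGet? lastLayer 0).getD 0 - 1) gates_per_layer)
              :: lastLayer
        tl ++ [newlast]) tl0
    all ++ [tl]) []

-- ===== PORT B =====
def make_lightcone_py_alt (num_qubits : Int) (depth : Option Int) : List (List (List Int)) :=
  let _depth : Int := depth.getD (PySem.Int.floordiv num_qubits 2)
  let gates_per_layer := PySem.Int.floordiv num_qubits 2
  let last_layer_offset := PySem.Int.mod (gates_per_layer + 1) 2
  (PySem.List.pyRange 0 num_qubits 1).foldl (fun out qid =>
    let g0 := PySem.Int.floordiv (PySem.Int.mod (qid - last_layer_offset) num_qubits) 2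
    let layers := (PySem.List.pyRange 1 gates_per_layer 1).foldl
      (fun ls k =>
        let right := PySem.Int.floordiv (k + last_layer_offset) 2
        let left := k - right
        ls ++ [ (PySem.List.pyRange (g0 - left) g0 1).map
                  (fun v => PySem.Int.mod v gates_per_layer)
                ++ [g0]
                ++ (PySem.List.pyRange (g0 + 1) (g0 + right + 1) 1).map
                  (fun v => PySem.Int.mod v gates_per_layer) ]) [[g0]]
    out ++ [layers]) []

-- ===== PRECONDITION & SPEC =====
def Spec_make_lightcone_py (num_qubits : Int) (depth : Option Int) (out : List (List (List Int))) : Prop := out = make_lightcone_py_alt num_qubits depth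
instance (num_qubits : Int) (depth : Option Int) (out : List (List (List Int))) : Decidable (Spec_make_lightcone_py num_qubits depth out) := by unfold Spec_make_lightcone_py; infer_instance

-- ===== CLAIM (what is proved, stated in full; the proofs are below) =====
def Claim_equal_make_lightcone_py : Prop := ∀ (num_qubits : Int) (depth : Option Int), Dom_make_lightcone_py num_qubits depth → Spec_make_lightcone_py num_qubits depth (make_lightcone_py num_qubits depth)

-- ===== LEMMAS AND PROOFS =====

-- the layer B builds for step k (an Int), around pivot g0
def pvWindow (g0 gpl llo k : Int) : List Int :=
  let right := PySem.Int.floordiv (k + llo) 2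
  let left := k - right
  (PySem.List.pyRange (g0 - left) g0 1).map (fun v => PySem.Int.mod v gpl)
  ++ [g0]
  ++ (PySem.List.pyRange (g0 + 1) (g0 + right + 1) 1).map (fun v => PySem.Int.mod v gpl)

theorem pvWindow_zero (g0 gpl llo : Int) (h : llo = 0 ∨ llo = 1) :
    pvWindow g0 gpl llo 0 = [g0] := by
  have hl2 : (0 + llo) / 2 = 0 := by omega
  simp only [pvWindow, PySem.Int.floordiv_eq_ediv_of_pos (by omega : (0:Int) < 2), hl2]
  rw [PySem.List.pyRange_one_eq_nil (by omega), PySem.List.pyRange_one_eq_nil (by omega)]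
  simp

-- A's inner-loop step (definitionally the lambda inside make_lightcone_py)
def pvStepA (gpl llo : Int) (tl : List (List Int)) (layer_id : Int) : List (List Int) :=
  let lastLayer := (PySem.List.pyGet? tl (-1)).getD []
  let offset := PySem.Int.mod (layer_id + llo) 2
  let newlast :=
    if offset = 0 then
      lastLayer ++ [PySem.Int.mod ((PySem.List.pyGet? lastLayer (-1)).getD 0 + 1) gpl]
    else
      (PySem.Int.mod ((PySem.List.pyGet? lastLayer 0).getD 0 - 1) gpl) :: lastLayer
  tl ++ [newlast]

theorem pvmod_shift (a b g : Int) (hg : 0 < g) :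
    PySem.Int.mod (PySem.Int.mod a g + b) g = PySem.Int.mod (a + b) g := by
  rw [PySem.Int.mod_eq_emod_of_pos hg, PySem.Int.mod_eq_emod_of_pos hg,
    PySem.Int.mod_eq_emod_of_pos hg, Int.add_emod, Int.emod_emod_of_dvd _ dvd_rfl,
    ← Int.add_emod]

theorem pvGetLast?_triple {α : Type} (xs ys : List α) (a b : α) :
    (xs ++ [a] ++ (ys ++ [b])).getLast? = some b := by
  rw [show xs ++ [a] ++ (ys ++ [b]) = (xs ++ [a] ++ ys) ++ [b] by simp, List.getLast?_concat]

theorem pvWindow_succ (g0 gpl llo k : Int) (hg : 0 < gpl) (hl : llo = 0 ∨ llo = 1)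
    (hk : 0 ≤ k) :
    pvWindow g0 gpl llo (k + 1) =
      if PySem.Int.mod (k + 1 + llo) 2 = 0 then
        pvWindow g0 gpl llo k ++
          [PySem.Int.mod (((pvWindow g0 gpl llo k).getLast?).getD 0 + 1) gpl]
      else
        PySem.Int.mod (((pvWindow g0 gpl llo k).head?).getD 0 - 1) gpl
          :: pvWindow g0 gpl llo k := by
  have h2 : (0:Int) < 2 := by omega
  simp only [pvWindow, PySem.Int.mod_eq_emod_of_pos h2, PySem.Int.floordiv_eq_ediv_of_pos h2]
  set r := (k + llo) / 2 with hrdef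
  set r' := (k + 1 + llo) / 2 with hr'def
  have hr0 : 0 ≤ r := by omega
  have hl0 : 0 ≤ k - r := by omega
  by_cases hpar : (k + 1 + llo) % 2 = 0
  · -- append on the right: r' = r + 1, left unchanged
    have hrr : r' = r + 1 := by omega
    rw [if_pos hpar, hrr, show g0 - (k + 1 - (r + 1)) = g0 - (k - r) by ring]
    -- split off the last element of the new right wing
    have hsplit : PySem.List.pyRange (g0 + 1) (g0 + (r + 1) + 1) 1 =
        PySem.List.pyRange (g0 + 1) (g0 + r + 1) 1 ++ [g0 + r + 1] := by
      have := PySem.List.pyRange_one_succ_right (a := g0 + 1) (b := g0 + r + 1) (by omega)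
      rw [show g0 + (r + 1) + 1 = g0 + r + 1 + 1 by ring, this]
    rw [hsplit, List.map_append]
    by_cases hr : r = 0
    · have hnil : PySem.List.pyRange (g0 + 1) (g0 + r + 1) 1 = [] := by
        rw [hr]; exact PySem.List.pyRange_one_eq_nil (by omega)
      rw [hnil]
      simp [hr, PySem.Int.mod_eq_emod_of_pos hg]
    · -- last element of the old right wing is (g0 + r) % gpl
      have hsplit2 : PySem.List.pyRange (g0 + 1) (g0 + r + 1) 1 =
          PySem.List.pyRange (g0 + 1) (g0 + r) 1 ++ [g0 + r] :=
        PySem.List.pyRange_one_succ_right (by omega)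
      rw [hsplit2, List.map_append]
      simp only [List.map_cons, List.map_nil]
      rw [pvGetLast?_triple, Option.getD_some, pvmod_shift (g0 + r) 1 gpl hg]
      simp [List.append_assoc]
  · -- prepend on the left: r' = r, left grows by one
    have hrr : r' = r := by omega
    rw [if_neg hpar, hrr, show g0 - (k + 1 - r) = g0 - (k - r + 1) by ring]
    have hcons : PySem.List.pyRange (g0 - (k - r + 1)) g0 1 =
        (g0 - (k - r + 1)) :: PySem.List.pyRange (g0 - (k - r)) g0 1 := by
      have := PySem.List.pyRange_one_cons (a := g0 - (k - r + 1)) (b := g0) (by omega)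
      rw [this, show g0 - (k - r + 1) + 1 = g0 - (k - r) by ring]
    rw [hcons]
    by_cases hlz : k - r = 0
    · have hnil : PySem.List.pyRange (g0 - (k - r)) g0 1 = [] := by
        rw [hlz]; exact PySem.List.pyRange_one_eq_nil (by omega)
      rw [hnil]
      simp [hlz, PySem.Int.mod_eq_emod_of_pos hg]
    · have hcons2 : PySem.List.pyRange (g0 - (k - r)) g0 1 =
          (g0 - (k - r)) :: PySem.List.pyRange (g0 - (k - r) + 1) g0 1 :=
        PySem.List.pyRange_one_cons (by omega)
      rw [hcons2]
      simp [PySem.Int.mod_eq_emod_of_pos hg]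
      congr 1
      ring

theorem pvFoldA_eq (g0 gpl llo : Int) (hg : 0 < gpl) (hl : llo = 0 ∨ llo = 1) (j : Nat) :
    (PySem.List.pyRange 1 ((j : Int) + 1) 1).foldl (pvStepA gpl llo) [[g0]] =
      (PySem.List.pyRange 0 ((j : Int) + 1) 1).map (pvWindow g0 gpl llo) := by
  induction j with
  | zero =>
    rw [PySem.List.pyRange_one_eq_nil (by omega)]
    rw [show ((0:Nat):Int) + 1 = 0 + 1 by omega, PySem.List.pyRange_one_singleton]
    simp [pvWindow_zero g0 gpl llo hl]
  | succ j ih =>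
    have hstep : PySem.List.pyRange 1 (((j:Nat) + 1 : Nat) + 1 : Int) 1 =
        PySem.List.pyRange 1 ((j : Int) + 1) 1 ++ [(j : Int) + 1] := by
      push_cast
      rw [PySem.List.pyRange_one_succ_right (by omega)]
    have hstep0 : PySem.List.pyRange 0 (((j:Nat) + 1 : Nat) + 1 : Int) 1 =
        PySem.List.pyRange 0 ((j : Int) + 1) 1 ++ [(j : Int) + 1] := by
      push_cast
      rw [PySem.List.pyRange_one_succ_right (by omega)]
    have hlastsplit : PySem.List.pyRange 0 ((j : Int) + 1) 1 =
        PySem.List.pyRange 0 (j : Int) 1 ++ [(j : Int)] :=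
      PySem.List.pyRange_one_succ_right (by omega)
    rw [hstep, hstep0, List.foldl_append, ih, List.map_append]
    simp only [List.foldl_cons, List.foldl_nil]
    -- one application of the step to the accumulated windows
    rw [pvStepA]
    have hacc : (PySem.List.pyRange 0 ((j : Int) + 1) 1).map (pvWindow g0 gpl llo) =
        (PySem.List.pyRange 0 (j : Int) 1).map (pvWindow g0 gpl llo)
          ++ [pvWindow g0 gpl llo (j : Int)] := by
      rw [hlastsplit, List.map_append]; simp
    rw [hacc, PySem.List.pyGet?_neg_one_append_singleton]
    simp only [Option.getD_some]
    rw [← hacc]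
    congr 1
    have hws := pvWindow_succ g0 gpl llo (j : Int) hg hl (by omega)
    rw [show (j : Int) + 1 + llo = (j : Int) + 1 + llo by ring] at hws
    simp only [List.map_cons, List.map_nil]
    by_cases hoff : PySem.Int.mod ((j : Int) + 1 + llo) 2 = 0
    · rw [if_pos hoff, hws, if_pos hoff, PySem.List.pyGet?_neg_one]
    · rw [if_neg hoff, hws, if_neg hoff, PySem.List.pyGet?_zero]
      cases pvWindow g0 gpl llo (j : Int) <;> simp

theorem pvFoldl_append_map {α β : Type} (f : α → β) (l : List α) (init : List β) :
    l.foldl (fun acc x => acc ++ [f x]) init = init ++ l.map f := by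
  induction l generalizing init with
  | nil => simp
  | cons x xs ih => simp [ih]

-- per-qubit inner computations of the two ports (definitionally their inline code)
def pvInnerA (n qid : Int) : List (List Int) :=
  let gpl := PySem.Int.floordiv n 2
  let llo := PySem.Int.mod (gpl + 1) 2
  let g0 := PySem.Int.floordiv (PySem.Int.mod (qid - llo) n) 2
  (PySem.List.pyRange 1 (PySem.Int.floordiv n 2) 1).foldl (pvStepA gpl llo) [[g0]]

def pvInnerB (n qid : Int) : List (List Int) :=
  let gpl := PySem.Int.floordiv n 2
  let llo := PySem.Int.mod (gpl + 1) 2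
  let g0 := PySem.Int.floordiv (PySem.Int.mod (qid - llo) n) 2
  (PySem.List.pyRange 1 gpl 1).foldl (fun ls k => ls ++ [pvWindow g0 gpl llo k]) [[g0]]

theorem pvInner_core (gpl g0 : Int) :
    (PySem.List.pyRange 1 gpl 1).foldl (pvStepA gpl (PySem.Int.mod (gpl + 1) 2)) [[g0]] =
      (PySem.List.pyRange 1 gpl 1).foldl
        (fun ls k => ls ++ [pvWindow g0 gpl (PySem.Int.mod (gpl + 1) 2) k]) [[g0]] := by
  set llo := PySem.Int.mod (gpl + 1) 2 with hllo
  rw [pvFoldl_append_map (fun k => pvWindow g0 gpl llo k)]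
  by_cases hg : gpl ≤ 1
  · rw [PySem.List.pyRange_one_eq_nil (by omega)]; simp
  · have hg0 : (0:Int) < gpl := by omega
    have hl : llo = 0 ∨ llo = 1 := by
      rw [hllo, PySem.Int.mod_eq_emod_of_pos (show (0:Int) < 2 by omega)]; omega
    have hj : ((gpl - 1).toNat : Int) + 1 = gpl := by omega
    have h := pvFoldA_eq g0 gpl llo hg0 hl (gpl - 1).toNat
    rw [hj] at h
    rw [h, PySem.List.pyRange_one_cons hg0, List.map_cons, pvWindow_zero g0 gpl llo hl]
    simp

theorem pvInner_eq (n qid : Int) : pvInnerA n qid = pvInnerB n qid :=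
  pvInner_core (PySem.Int.floordiv n 2)
    (PySem.Int.floordiv
      (PySem.Int.mod (qid - PySem.Int.mod (PySem.Int.floordiv n 2 + 1) 2) n) 2)

theorem make_lightcone_py_spec : Claim_equal_make_lightcone_py := by
  intro n depth _
  show make_lightcone_py n depth = make_lightcone_py_alt n depth
  have hA : make_lightcone_py n depth =
      (PySem.List.pyRange 0 n 1).foldl (fun all qid => all ++ [pvInnerA n qid]) [] := rfl
  have hB : make_lightcone_py_alt n depth =
      (PySem.List.pyRange 0 n 1).foldl (fun out qid => out ++ [pvInnerB n qid]) [] := rfl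
  rw [hA, hB, pvFoldl_append_map (pvInnerA n), pvFoldl_append_map (pvInnerB n)]
  simp only [List.nil_append]
  exact List.map_congr_left (fun qid _ => pvInner_eq n qid)
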